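-- pv_equiv track=rewrite | github.com/mand6560/CP431_A2 | a2.py | does_merged_list_match
-- ===== SOURCE A (Python) =====
-- def does_merged_list_match(A, B, C):
--     """ Checks if array C contains all of the values in both A and B and the
--     same frequencies """
--     orig_dict = {}
--     for item in A:
--         if item in orig_dict:
--             orig_dict[item] += 1
--         else:
--             orig_dict[item] = 1
--     for item in B:
--         if item in orig_dict:
--             orig_dict[item] += 1
--         else:
--             orig_dict[item] = 1
--     merged_dict = {}
--     for item in C:
--         if item in merged_dict:
--             merged_dict[item] += 1
--         else:
--             merged_dict[item] = 1
--     return orig_dict == merged_dict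
-- ===== SOURCE B (Python) =====
-- def does_merged_list_match(A, B, C):
--     """ Checks if array C contains all of the values in both A and B and the
--     same frequencies """
--     return sorted(A + B) == sorted(C)
-- ===== Notes on version B (the rewrite author's own statement) =====
-- stated objective: idiomatic
-- what changed: B sorts the concatenation A+B and sorts C and compares the two sorted lists, instead of building two hash-based frequency dicts and comparing them for equality.
import Mathlib
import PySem

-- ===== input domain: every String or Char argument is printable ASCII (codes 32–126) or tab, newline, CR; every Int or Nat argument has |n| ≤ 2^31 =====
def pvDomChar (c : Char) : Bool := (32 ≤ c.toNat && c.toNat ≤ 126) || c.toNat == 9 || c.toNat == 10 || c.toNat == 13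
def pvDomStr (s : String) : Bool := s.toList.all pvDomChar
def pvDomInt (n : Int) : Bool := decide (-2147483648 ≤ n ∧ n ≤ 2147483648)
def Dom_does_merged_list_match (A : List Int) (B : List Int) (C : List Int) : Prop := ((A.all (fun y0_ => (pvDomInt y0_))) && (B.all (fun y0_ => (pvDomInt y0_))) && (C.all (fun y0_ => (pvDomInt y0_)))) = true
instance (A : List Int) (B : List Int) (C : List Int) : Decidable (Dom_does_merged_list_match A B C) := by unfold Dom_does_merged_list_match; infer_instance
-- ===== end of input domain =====

-- B replaces A's two hash-based frequency dicts and dict-equality test with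
-- sorting A+B and C and comparing the sorted lists: a different algorithm
-- (sort-and-compare vs counting) for the same multiset-merge check.


-- ===== PORT A =====
-- one counting loop of A: 'if item in d: d[item] += 1 else: d[item] = 1'
def pvCountStep (d : PySem.Dict Int Int) (item : Int) : PySem.Dict Int Int :=
  if d.contains item then d.insert item (d.getD item 0 + 1) else d.insert item 1

-- Python's 'd1 == d2' on dicts: same key set and the same value at every key
def pvDictEq (d1 d2 : PySem.Dict Int Int) : Bool :=
  PySem.Set.equal d1.keys d2.keys && d1.keys.all (fun k => d1.get? k == d2.get? k)

def does_merged_list_match (A : List Int) (B : List Int) (C : List Int) : Bool :=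
  let orig_dict := A.foldl pvCountStep PySem.Dict.empty
  let orig_dict := B.foldl pvCountStep orig_dict
  let merged_dict := C.foldl pvCountStep PySem.Dict.empty
  pvDictEq orig_dict merged_dict

-- ===== PORT B =====
def does_merged_list_match_alt (A : List Int) (B : List Int) (C : List Int) : Bool :=
  PySem.List.sorted (A ++ B) (fun x => x) == PySem.List.sorted C (fun x => x)

-- ===== PRECONDITION & SPEC =====
def Spec_does_merged_list_match (A : List Int) (B : List Int) (C : List Int) (out : Bool) : Prop := out = does_merged_list_match_alt A B C
instance (A : List Int) (B : List Int) (C : List Int) (out : Bool) : Decidable (Spec_does_merged_list_match A B C out) := by unfold Spec_does_merged_list_match; infer_instance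

-- ===== CLAIM (what is proved, stated in full; the proofs are below) =====
def Claim_equal_does_merged_list_match : Prop := ∀ (A : List Int) (B : List Int) (C : List Int), Dom_does_merged_list_match A B C → Spec_does_merged_list_match A B C (does_merged_list_match A B C)

-- ===== LEMMAS AND PROOFS =====

-- A's branching step is the unconditional counting insert
theorem pvCountStep_eq (d : PySem.Dict Int Int) (x : Int) :
    pvCountStep d x = d.insert x (d.getD x 0 + 1) := by
  unfold pvCountStep
  split_ifs with h
  · rfl
  · rw [PySem.Dict.getD_of_not_contains d 0 (by simpa using h)]
    norm_num

theorem foldl_pvCountStep (l : List Int) (d : PySem.Dict Int Int) :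
    l.foldl pvCountStep d = l.foldl (fun d x => d.insert x (d.getD x 0 + 1)) d :=
  PySem.List.foldl_congr_mem _ _ _ _ (fun acc x _ => pvCountStep_eq acc x)

-- A side characterisation: A returns true iff the element counts agree
theorem portA_iff (A B C : List Int) :
    does_merged_list_match A B C = true ↔ ∀ v : Int, (A ++ B).count v = C.count v := by
  simp only [does_merged_list_match]
  rw [foldl_pvCountStep, foldl_pvCountStep, foldl_pvCountStep, ← List.foldl_append,
    PySem.Dict.foldl_insert_getD_add_one_eq_counter, PySem.Dict.foldl_insert_getD_add_one_eq_counter]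
  unfold pvDictEq
  rw [Bool.and_eq_true, PySem.Set.equal_iff, List.all_eq_true]
  simp only [PySem.Dict.keys_counter, PySem.Set.mem_ofList]
  constructor
  · rintro ⟨hk, hv⟩ v
    by_cases hm : v ∈ A ++ B
    · have := hv v hm
      rw [beq_iff_eq] at this
      have h1 : (PySem.Dict.counter (A ++ B)).getD v 0 = (PySem.Dict.counter C).getD v 0 := by
        rw [PySem.Dict.getD_eq_get?_getD, PySem.Dict.getD_eq_get?_getD, this]
      rw [PySem.Dict.getD_counter, PySem.Dict.getD_counter] at h1
      exact_mod_cast h1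
    · have hc : v ∉ C := fun hvc => hm ((hk v).mpr hvc)
      rw [List.count_eq_zero_of_not_mem hm, List.count_eq_zero_of_not_mem hc]
  · intro h
    have hmem : ∀ v : Int, v ∈ A ++ B ↔ v ∈ C := by
      intro v
      rw [← List.count_pos_iff, ← List.count_pos_iff, h v]
    refine ⟨hmem, fun v hm => ?_⟩
    have h1 : (PySem.Dict.counter (A ++ B)).contains v = true := by
      simp [PySem.Dict.contains_counter, hm]
    have h2 : (PySem.Dict.counter C).contains v = true := by
      simp [PySem.Dict.contains_counter, (hmem v).mp hm]
    rw [PySem.Dict.contains_eq_isSome_get?] at h1 h2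
    rcases Option.isSome_iff_exists.mp h1 with ⟨a, ha⟩
    rcases Option.isSome_iff_exists.mp h2 with ⟨b, hb⟩
    have ga : (PySem.Dict.counter (A ++ B)).getD v 0 = a := PySem.Dict.getD_of_get?_eq_some _ 0 ha
    have gb : (PySem.Dict.counter C).getD v 0 = b := PySem.Dict.getD_of_get?_eq_some _ 0 hb
    rw [PySem.Dict.getD_counter] at ga gb
    rw [ha, hb, beq_iff_eq]
    rw [← ga, ← gb, h v]

-- B side characterisation: the sorted lists are equal iff the counts agree
theorem portB_iff (A B C : List Int) :
    does_merged_list_match_alt A B C = true ↔ ∀ v : Int, (A ++ B).count v = C.count v := by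
  simp only [does_merged_list_match_alt, beq_iff_eq]
  rw [PySem.List.sorted_id_eq_sorted_id_iff_perm, List.perm_iff_count]

-- ===== VERDICT (by name: the statement is the Claim_ definition above) =====
theorem does_merged_list_match_spec : Claim_equal_does_merged_list_match := by
  intro A B C _
  unfold Spec_does_merged_list_match
  rw [Bool.eq_iff_iff, portA_iff, portB_iff]
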